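-- pv_equiv track=rewrite | github.com/tnoone125/ML-Algos | knn.py | insertNeighbor
-- ===== SOURCE A (Python) =====
-- def insertNeighbor(j, d, ind, dis):
--     newDis=dis
--     newInd=ind
--     for x in range(len(dis)):
--         if d <= dis[x]:
--             newDis = dis[:x]+[d]+dis[x:len(dis)-1]
--             newInd = ind[:x]+[j]+ind[x:len(dis)-1]
--             break
--
--     return (newInd, newDis)
-- ===== SOURCE B (Python) =====
-- def insertNeighbor(j, d, ind, dis):
--     n = len(dis)
--     newDis = []
--     x = None
--     for i, v in enumerate(dis):
--         if x is None and d <= v: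
--             x = i
--             newDis.append(d)
--         newDis.append(v)
--     if x is None:
--         return (ind, dis)
--     del newDis[-1]
--     newInd = ind[:n - 1]
--     newInd.insert(x, j)
--     return (newInd, newDis)
-- ===== Notes on version B (the rewrite author's own statement) =====
-- stated objective: alternative
-- what changed: A finds the insertion index with an indexed scan and then rebuilds both lists from three slices; B builds the new distance list in a single interleaving pass over enumerate(dis) (inserting d in-flight, truncating once at the end) and places j with a single list.insert into the truncated index list.
import Mathlib
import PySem

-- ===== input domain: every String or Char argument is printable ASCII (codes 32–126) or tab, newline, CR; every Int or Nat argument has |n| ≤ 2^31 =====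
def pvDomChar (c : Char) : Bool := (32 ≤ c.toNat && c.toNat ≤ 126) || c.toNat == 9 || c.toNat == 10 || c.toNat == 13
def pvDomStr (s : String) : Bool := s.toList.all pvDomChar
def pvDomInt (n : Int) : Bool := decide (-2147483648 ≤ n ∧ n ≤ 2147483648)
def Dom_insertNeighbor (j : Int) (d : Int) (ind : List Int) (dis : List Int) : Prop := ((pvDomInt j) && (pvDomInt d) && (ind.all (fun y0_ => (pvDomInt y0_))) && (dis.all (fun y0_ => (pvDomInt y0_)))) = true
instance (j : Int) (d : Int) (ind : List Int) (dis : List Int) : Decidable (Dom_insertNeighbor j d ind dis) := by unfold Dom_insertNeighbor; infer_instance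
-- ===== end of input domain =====

-- B replaces A's find-then-slice-reconstruct with a single interleaving pass that builds the
-- new distance list while scanning, then truncates; objective: alternative (same cost).

-- ===== PORT A =====
-- loop 'for x in range(len(dis)): if d <= dis[x]: …; break' as index recursion
def insertNeighborLoop (j : Int) (d : Int) (ind : List Int) (dis : List Int) (x : Nat) : List Int × List Int :=
  if hx : x < dis.length then
    if d ≤ dis[x] then
      (PySem.List.slice ind none (some (x : Int)) ++ [j] ++ PySem.List.slice ind (some (x : Int)) (some ((dis.length : Int) - 1)),
       PySem.List.slice dis none (some (x : Int)) ++ [d] ++ PySem.List.slice dis (some (x : Int)) (some ((dis.length : Int) - 1)))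
    else insertNeighborLoop j d ind dis (x + 1)
  else (ind, dis)
termination_by dis.length - x

def insertNeighbor (j : Int) (d : Int) (ind : List Int) (dis : List Int) : List Int × List Int :=
  insertNeighborLoop j d ind dis 0

-- ===== PORT B =====
-- one fold over enumerate(dis): state = (newDis so far, optional insertion index)
def insertNeighborStep (d : Int) (st : List Int × Option Int) (iv : Int × Int) : List Int × Option Int :=
  match st.2 with
  | none => if d ≤ iv.2 then (st.1 ++ [d, iv.2], some iv.1) else (st.1 ++ [iv.2], none)
  | some x => (st.1 ++ [iv.2], some x)

def insertNeighbor_alt (j : Int) (d : Int) (ind : List Int) (dis : List Int) : List Int × List Int :=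
  let st := (PySem.List.enumerate dis 0).foldl (insertNeighborStep d) ([], none)
  match st.2 with
  | none => (ind, dis)
  | some x =>
      (PySem.List.insert (PySem.List.slice ind none (some ((dis.length : Int) - 1))) x j,
       st.1.dropLast)

-- ===== PRECONDITION & SPEC =====
def Spec_insertNeighbor (j : Int) (d : Int) (ind : List Int) (dis : List Int) (out : List Int × List Int) : Prop := out = insertNeighbor_alt j d ind dis
instance (j : Int) (d : Int) (ind : List Int) (dis : List Int) (out : List Int × List Int) : Decidable (Spec_insertNeighbor j d ind dis out) := by unfold Spec_insertNeighbor; infer_instance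

-- ===== CLAIM (what is proved, stated in full; the proofs are below) =====
def Claim_equal_insertNeighbor : Prop := ∀ (j : Int) (d : Int) (ind : List Int) (dis : List Int), Dom_insertNeighbor j d ind dis → Spec_insertNeighbor j d ind dis (insertNeighbor j d ind dis)

-- ===== LEMMAS AND PROOFS =====

-- A's loop returns the first-hit slice form, indexed by findIdx? on the unscanned suffix.
theorem loopA_char (j d : Int) (ind dis : List Int) (x : Nat) :
    insertNeighborLoop j d ind dis x =
      match List.findIdx? (fun v => decide (d ≤ v)) (dis.drop x) with
      | none => (ind, dis)
      | some i =>
        (PySem.List.slice ind none (some ((x + i : Nat) : Int)) ++ [j] ++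
           PySem.List.slice ind (some ((x + i : Nat) : Int)) (some ((dis.length : Int) - 1)),
         PySem.List.slice dis none (some ((x + i : Nat) : Int)) ++ [d] ++
           PySem.List.slice dis (some ((x + i : Nat) : Int)) (some ((dis.length : Int) - 1))) := by
  fun_induction insertNeighborLoop j d ind dis x with
  | case1 x hx hd =>
      rw [List.drop_eq_getElem_cons hx, List.findIdx?_cons]
      simp [hd]
  | case2 x hx hd ih =>
      rw [List.drop_eq_getElem_cons hx, List.findIdx?_cons]
      simp only [decide_eq_true_eq, hd, if_false]
      rw [ih]
      cases hf : List.findIdx? (fun v => decide (d ≤ v)) (dis.drop (x + 1)) with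
      | none => simp
      | some i =>
          simp only [Option.map_some]
          have : x + 1 + i = x + (i + 1) := by omega
          rw [this]
  | case3 x hx =>
      have : dis.length ≤ x := by omega
      simp [List.drop_eq_nil_of_le this]

-- B's fold once the insertion already happened: it just appends the remaining elements.
theorem foldB_some (d : Int) (l : List Int) (acc : List Int) (s x : Int) :
    (PySem.List.enumerate l s).foldl (insertNeighborStep d) (acc, some x) = (acc ++ l, some x) := by
  induction l generalizing acc s with
  | nil => simp [PySem.List.enumerate_nil]
  | cons a t ih => simp [PySem.List.enumerate_cons, List.foldl_cons, insertNeighborStep, ih]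

-- B's fold from the searching state: interleaves d at the first hit and records s + index.
theorem foldB_none (d : Int) (l : List Int) (acc : List Int) (s : Int) :
    (PySem.List.enumerate l s).foldl (insertNeighborStep d) (acc, none) =
      match List.findIdx? (fun v => decide (d ≤ v)) l with
      | none => (acc ++ l, none)
      | some i => (acc ++ l.take i ++ [d] ++ l.drop i, some (s + (i : Int))) := by
  induction l generalizing acc s with
  | nil => simp [PySem.List.enumerate_nil]
  | cons a t ih =>
      rw [PySem.List.enumerate_cons, List.foldl_cons, List.findIdx?_cons]
      by_cases hd : d ≤ a
      · simp only [insertNeighborStep, hd, decide_true, if_true]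
        rw [foldB_some]
        simp
      · simp only [insertNeighborStep, hd, decide_false, if_false]
        rw [ih]
        cases List.findIdx? (fun v => decide (d ≤ v)) t with
        | none => simp
        | some i =>
            simp only [Bool.false_eq_true, if_false]
            simp [List.take_succ_cons, List.drop_succ_cons]
            ring

-- Python list.insert at a nonnegative position, clamped form valid for every p.
theorem insert_take_drop (xs : List Int) (p : Nat) (v : Int) :
    PySem.List.insert xs (p : Int) v = xs.take p ++ v :: xs.drop p := by
  by_cases hp : p ≤ xs.length
  · exact PySem.List.insert_natCast xs p v hp
  · have h2 : xs.take p = xs := List.take_of_length_le (by omega)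
    have h3 : xs.drop p = [] := List.drop_eq_nil_of_le (by omega)
    rw [h2, h3]
    simp [PySem.List.insert, PySem.List.sliceIndices]
    have hc : (if (p : Int) < 0 then max ((p : Int) + xs.length) 0 else min (p : Int) xs.length).toNat = xs.length := by
      rw [if_neg (by omega)]
      omega
    rw [hc]
    simp

theorem insertNeighbor_spec : Claim_equal_insertNeighbor := by
  intro j d ind dis _
  unfold Spec_insertNeighbor insertNeighbor insertNeighbor_alt
  rw [loopA_char]
  rw [foldB_none]
  cases h : List.findIdx? (fun v => decide (d ≤ v)) dis with
  | none => simp [h]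
  | some i =>
      have hi : i < dis.length := by
        have := List.findIdx?_eq_some_iff_findIdx_eq.mp h
        exact this.1
      simp only [List.drop_zero, h, Nat.zero_add, List.nil_append]
      have hn1 : ((dis.length : Int) - 1) = (((dis.length - 1 : Nat)) : Int) := by omega
      have hi0 : (0 + (i : Int)) = ((i : Nat) : Int) := by omega
      rw [hn1, hi0, PySem.List.slice_to_natCast, PySem.List.slice_to_natCast,
        PySem.List.slice_to_natCast, PySem.List.slice_natCast, PySem.List.slice_natCast,
        insert_take_drop]
      have hd_ne : dis.drop i ≠ [] := by
        intro he
        have := List.drop_eq_nil_iff.mp he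
        omega
      rw [List.dropLast_append_of_ne_nil hd_ne]
      simp only [List.take_take, List.drop_take, List.dropLast_eq_take, List.length_drop,
        Prod.mk.injEq]
      constructor
      · rw [min_eq_left (by omega : i ≤ dis.length - 1)]
        simp
      · have h21 : dis.length - 1 - i = dis.length - i - 1 := by omega
        rw [h21]
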